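-- pv_equiv track=rewrite | github.com/Danto7632/ia-codyssey | essential_step_1/essential_procedure_2/problem_1/door_hacking.py | number_to_indexes
-- ===== SOURCE A (Python) =====
-- PASSWORD_LENGTH = 6
--
-- CHARACTERS = '0123456789abcdefghijklmnopqrstuvwxyz'
--
-- def number_to_indexes(number):
--     indexes = [0] * PASSWORD_LENGTH
--     position = PASSWORD_LENGTH - 1
--
--     while position >= 0:
--         indexes[position] = number % len(CHARACTERS)
--         number = number // len(CHARACTERS)
--         position = position - 1
--
--     return indexes
-- ===== SOURCE B (Python) =====
-- PASSWORD_LENGTH = 6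
--
-- CHARACTERS = '0123456789abcdefghijklmnopqrstuvwxyz'
--
-- def number_to_indexes(number):
--     base = len(CHARACTERS)
--     return [(number // base ** (PASSWORD_LENGTH - 1 - i)) % base
--             for i in range(PASSWORD_LENGTH)]
-- ===== Notes on version B (the rewrite author's own statement) =====
-- stated objective: alternative
-- what changed: Replaces the stateful back-to-front while loop that repeatedly divides a carried quotient down by a comprehension that computes every output digit independently from the original number via a positional power of the alphabet size.
import Mathlib
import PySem

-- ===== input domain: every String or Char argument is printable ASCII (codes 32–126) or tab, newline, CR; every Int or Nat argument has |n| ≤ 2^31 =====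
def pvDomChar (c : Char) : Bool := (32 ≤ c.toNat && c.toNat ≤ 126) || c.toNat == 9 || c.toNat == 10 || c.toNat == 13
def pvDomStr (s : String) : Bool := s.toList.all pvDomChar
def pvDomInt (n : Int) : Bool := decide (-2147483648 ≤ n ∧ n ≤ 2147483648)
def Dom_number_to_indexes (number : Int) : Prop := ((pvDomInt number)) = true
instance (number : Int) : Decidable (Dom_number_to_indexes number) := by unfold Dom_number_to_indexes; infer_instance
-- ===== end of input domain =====

-- B replaces A's stateful back-to-front quotient-dividing loop with a closed-form
-- per-digit formula (number // 36^(5-i)) % 36 over the positions; same cost, different decomposition.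


-- ===== PORT A =====
-- A's while loop: position counts down from 5 to 0; fuel = position + 1.
-- Each step writes number % 36 at `position` (pySetD: index is always in range here)
-- and replaces number by number // 36.
def ntiLoop : Nat → Int → List Int → List Int
  | 0, _, indexes => indexes
  | p + 1, number, indexes =>
      ntiLoop p (PySem.Int.floordiv number 36)
        (PySem.List.pySetD indexes (p : Int) (PySem.Int.mod number 36))

def number_to_indexes (number : Int) : List Int :=
  ntiLoop 6 number (List.replicate 6 0)

-- ===== PORT B =====
def number_to_indexes_alt (number : Int) : List Int :=
  (PySem.List.pyRange 0 6 1).map (fun i =>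
    PySem.Int.mod (PySem.Int.floordiv number (36 ^ (6 - 1 - i).toNat)) 36)

-- ===== PRECONDITION & SPEC =====
def Spec_number_to_indexes (number : Int) (out : List Int) : Prop := out = number_to_indexes_alt number
instance (number : Int) (out : List Int) : Decidable (Spec_number_to_indexes number out) := by unfold Spec_number_to_indexes; infer_instance

-- ===== CLAIM (what is proved, stated in full; the proofs are below) =====
def Claim_equal_number_to_indexes : Prop := ∀ (number : Int), Dom_number_to_indexes number → Spec_number_to_indexes number (number_to_indexes number)

-- ===== LEMMAS AND PROOFS =====

-- collapsing A's iterated quotient: (n // a) // b = n // (a*b) for positive divisors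
theorem floordiv_floordiv (n a b : Int) (ha : 0 < a) (hb : 0 < b) :
    PySem.Int.floordiv (PySem.Int.floordiv n a) b = PySem.Int.floordiv n (a * b) := by
  rw [PySem.Int.floordiv_eq_ediv_of_pos (a := n) ha,
      PySem.Int.floordiv_eq_ediv_of_pos hb,
      PySem.Int.floordiv_eq_ediv_of_pos (by positivity)]
  exact Int.ediv_ediv_of_nonneg (x := n) (y := a) (z := b) ha.le

-- ===== VERDICT (by name: the statement is the Claim_ definition above) =====
theorem number_to_indexes_spec : Claim_equal_number_to_indexes := by
  intro n _
  show number_to_indexes n = number_to_indexes_alt n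
  simp only [number_to_indexes, number_to_indexes_alt, ntiLoop]
  norm_num [PySem.List.pyRange, PySem.List.pySetD, PySem.List.pySet?,
    PySem.List.pyIdx?, List.set, floordiv_floordiv, Int.ediv_ediv_of_nonneg,
    List.range_succ, Int.toNat, Function.comp_def, List.replicate]
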